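-- pv_equiv track=rewrite | github.com/think41/extrasuite | extradocx/src/extradocx/parser.py | _element_xpath
-- ===== SOURCE A (Python) =====
-- NS = {
--     "w": "http://schemas.openxmlformats.org/wordprocessingml/2006/main",
--     "r": "http://schemas.openxmlformats.org/officeDocument/2006/relationships",
--     "wp": "http://schemas.openxmlformats.org/drawingml/2006/wordprocessingDrawing",
--     "a": "http://schemas.openxmlformats.org/drawingml/2006/main",
--     "pic": "http://schemas.openxmlformats.org/drawingml/2006/picture",
--     "v": "urn:schemas-microsoft-com:vml",
--     "mc": "http://schemas.openxmlformats.org/markup-compatibility/2006",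
--     "w14": "http://schemas.microsoft.com/office/word/2010/wordml",
-- }
--
-- def _element_xpath(path_parts: list[tuple[str, int]]) -> str:
--     """Build an XPath string from a list of (clark-tag, 1-based-index) pairs."""
--     parts: list[str] = []
--     for clark, idx in path_parts:
--         # Simplify clark notation → prefix:local for readability
--         local = clark
--         for prefix, uri in NS.items():
--             uri_braced = f"{{{uri}}}"
--             if clark.startswith(uri_braced):
--                 local = f"{prefix}:{clark[len(uri_braced):]}"
--                 break
--         parts.append(f"{local}[{idx}]")
--     return "/" + "/".join(parts)
-- ===== SOURCE B (Python) =====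
-- NS = {
--     "w": "http://schemas.openxmlformats.org/wordprocessingml/2006/main",
--     "r": "http://schemas.openxmlformats.org/officeDocument/2006/relationships",
--     "wp": "http://schemas.openxmlformats.org/drawingml/2006/wordprocessingDrawing",
--     "a": "http://schemas.openxmlformats.org/drawingml/2006/main",
--     "pic": "http://schemas.openxmlformats.org/drawingml/2006/picture",
--     "v": "urn:schemas-microsoft-com:vml",
--     "mc": "http://schemas.openxmlformats.org/markup-compatibility/2006",
--     "w14": "http://schemas.microsoft.com/office/word/2010/wordml",
-- }
--
-- _REV = {uri: prefix for prefix, uri in NS.items()}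
--
--
-- def _local(clark: str) -> str:
--     """prefix:local form of a clark tag: split it once at the first '}' and
--     look the URI up in the reverse dict; any malformed tag stays as-is."""
--     if clark.startswith("{"):
--         head, sep, tag = clark.partition("}")
--         if sep:
--             prefix = _REV.get(head[1:])
--             if prefix is not None:
--                 return prefix + ":" + tag
--     return clark
--
--
-- def _go(parts: list[tuple[str, int]]) -> str:
--     """Emit '/<step>' for the first pair, then recurse on the rest."""
--     if not parts:
--         return ""
--     clark, idx = parts[0]
--     return "/" + _local(clark) + "[" + str(idx) + "]" + _go(parts[1:])
--
--
-- def _element_xpath(path_parts: list[tuple[str, int]]) -> str: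
--     return _go(path_parts) or "/"
-- ===== Notes on version B (the rewrite author's own statement) =====
-- stated objective: alternative
-- what changed: A accumulates a parts list (scanning all 8 NS entries with startswith per tag) and joins it; B builds the xpath directly by structural recursion, emitting '/step' per pair, and resolves each tag by one partition at the first '}' plus a single lookup in a reverse uri->prefix dict built once.
import Mathlib
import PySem

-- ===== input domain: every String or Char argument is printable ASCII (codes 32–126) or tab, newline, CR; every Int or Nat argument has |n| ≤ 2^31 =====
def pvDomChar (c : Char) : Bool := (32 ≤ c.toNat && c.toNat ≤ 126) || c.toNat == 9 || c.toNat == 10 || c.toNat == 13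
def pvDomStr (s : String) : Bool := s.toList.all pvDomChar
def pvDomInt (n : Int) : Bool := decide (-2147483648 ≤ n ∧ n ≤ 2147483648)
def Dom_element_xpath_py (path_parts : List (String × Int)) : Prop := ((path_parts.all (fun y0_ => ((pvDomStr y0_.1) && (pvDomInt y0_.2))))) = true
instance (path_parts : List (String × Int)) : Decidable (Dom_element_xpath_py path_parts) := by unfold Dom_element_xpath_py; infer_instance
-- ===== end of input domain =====

-- B builds the xpath by direct structural recursion (no parts list, no join) and resolves
-- each clark tag by one partition at the first '}' plus one lookup in a reverse uri->prefix
-- dict built once, instead of A's per-tag scan over all NS entries with startswith.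


-- ===== PORT A =====
-- the module constant NS (a dict literal with distinct keys = its association list, insertion order)
def pvNS : List (String × String) :=
  [("w", "http://schemas.openxmlformats.org/wordprocessingml/2006/main"),
   ("r", "http://schemas.openxmlformats.org/officeDocument/2006/relationships"),
   ("wp", "http://schemas.openxmlformats.org/drawingml/2006/wordprocessingDrawing"),
   ("a", "http://schemas.openxmlformats.org/drawingml/2006/main"),
   ("pic", "http://schemas.openxmlformats.org/drawingml/2006/picture"),
   ("v", "urn:schemas-microsoft-com:vml"),
   ("mc", "http://schemas.openxmlformats.org/markup-compatibility/2006"),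
   ("w14", "http://schemas.microsoft.com/office/word/2010/wordml")]

-- A's inner loop: 'local = clark; for prefix, uri in NS.items():
--   if clark.startswith("{"+uri+"}"): local = prefix + ":" + clark[len("{"+uri+"}"):]; break'
def pvNsLoop (ns : List (String × String)) (clark : List Char) : List Char :=
  match ns with
  | [] => clark
  | (pre, uri) :: rest =>
    if PySem.Chars.startswith clark ('{' :: uri.toList ++ ['}']) then
      pre.toList ++ ':' :: PySem.Chars.slice clark (some ((('{' :: uri.toList ++ ['}']).length : Nat) : Int)) none
    else pvNsLoop rest clark

def element_xpath_py (path_parts : List (String × Int)) : String :=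
  -- parts.append(f"{local}[{idx}]") inside the loop, then "/" + "/".join(parts)
  let parts : List (List Char) :=
    path_parts.foldl (fun acc p => acc ++ [pvNsLoop pvNS p.1.toList ++ '[' :: PySem.Int.toChars p.2 ++ [']']]) []
  String.ofList ('/' :: PySem.Chars.join ['/'] parts)

-- ===== PORT B =====
-- _REV = {uri: prefix for prefix, uri in NS.items()}
def pvREV : PySem.Dict String String :=
  pvNS.foldl (fun d p => d.insert p.2 p.1) (PySem.Dict.mk [])

-- def _local(clark): head, sep, tag = clark.partition("}") — partition at a single-char
-- separator is ported by hand as takeWhile/dropWhile at the first '}', which is exact —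
-- then one lookup of head[1:] in _REV
def pvLocal (clark : List Char) : List Char :=
  if PySem.Chars.startswith clark ['{'] then
    match clark.dropWhile (fun c => c != '}') with
    | _ :: tag =>
      match pvREV.get? (String.ofList (PySem.Chars.slice (clark.takeWhile (fun c => c != '}')) (some 1) none)) with
      | some pre => pre.toList ++ ':' :: tag
      | none => clark
    | [] => clark
  else clark

-- def _go(parts): '' for [], else '/' + _local(clark) + '[' + str(idx) + ']' + _go(rest)
def pvGo (parts : List (String × Int)) : List Char :=
  match parts with
  | [] => []
  | (clark, idx) :: rest =>
    '/' :: pvLocal clark.toList ++ '[' :: PySem.Int.toChars idx ++ ']' :: pvGo rest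

def element_xpath_py_alt (path_parts : List (String × Int)) : String :=
  -- return _go(path_parts) or "/"
  let s := pvGo path_parts
  if s = [] then "/" else String.ofList s

-- ===== PRECONDITION & SPEC =====
def Spec_element_xpath_py (path_parts : List (String × Int)) (out : String) : Prop := out = element_xpath_py_alt path_parts
instance (path_parts : List (String × Int)) (out : String) : Decidable (Spec_element_xpath_py path_parts out) := by unfold Spec_element_xpath_py; infer_instance

-- ===== CLAIM (what is proved, stated in full; the proofs are below) =====
def Claim_equal_element_xpath_py : Prop := ∀ (path_parts : List (String × Int)), Dom_element_xpath_py path_parts → Spec_element_xpath_py path_parts (element_xpath_py path_parts)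

-- ===== LEMMAS AND PROOFS =====

-- [c] is a prefix of l iff l starts with c
theorem pv_singleton_prefix (c : Char) (l : List Char) : [c] <+: l ↔ ∃ t, l = c :: t := by
  cases l with
  | nil => simp
  | cons a t => simp [List.cons_prefix_cons, eq_comm]

-- first-occurrence split of a list at a member
theorem pv_first_split {c : Char} {t : List Char} (h : c ∈ t) :
    ∃ u r, t = u ++ c :: r ∧ c ∉ u := by
  induction t with
  | nil => cases h
  | cons a t ih =>
    by_cases hac : a = c
    · exact ⟨[], t, by simp [hac], by simp⟩
    · have h' : c ∈ t := by
        rcases List.mem_cons.1 h with h1 | h1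
        · exact absurd h1.symm hac
        · exact h1
      rcases ih h' with ⟨u, r, ht, hu⟩
      refine ⟨a :: u, r, by simp [ht], ?_⟩
      intro hc
      rcases List.mem_cons.1 hc with h1 | h1
      · exact hac h1.symm
      · exact hu h1

-- with no '}' inside a and u, 'a}' being a prefix of 'u}r' pins a = u
theorem pv_brace_prefix (a : List Char) : ∀ (u r : List Char), '}' ∉ a → '}' ∉ u →
    ((a ++ ['}']) <+: (u ++ '}' :: r) ↔ a = u) := by
  induction a with
  | nil =>
    intro u r _ hu
    cases u with
    | nil => simp
    | cons d u' =>
      simp only [List.nil_append, List.cons_append, pv_singleton_prefix]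
      constructor
      · rintro ⟨t, ht⟩; cases ht; exact absurd (by simp) hu
      · intro h; cases h
  | cons b a' ih =>
    intro u r ha hu
    have ha' : '}' ∉ a' := fun h => ha (by simp [h])
    cases u with
    | nil =>
      simp only [List.nil_append, List.cons_append, List.cons_prefix_cons]
      constructor
      · rintro ⟨hb, _⟩; exact absurd (by simp [hb]) ha
      · intro h; cases h
    | cons d u' =>
      have hu' : '}' ∉ u' := fun h => hu (by simp [h])
      simp only [List.cons_append, List.cons_prefix_cons]
      rw [ih u' r ha' hu']
      constructor
      · rintro ⟨h1, h2⟩; rw [h1, h2]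
      · intro h; cases h; exact ⟨rfl, rfl⟩

-- A's loop is the identity when no entry's braced uri is a prefix
theorem pv_nsLoop_id (ns : List (String × String)) (cs : List Char)
    (h : ∀ p ∈ ns, PySem.Chars.startswith cs ('{' :: p.2.toList ++ ['}']) = false) :
    pvNsLoop ns cs = cs := by
  induction ns with
  | nil => rfl
  | cons p rest ih =>
    obtain ⟨pre, uri⟩ := p
    rw [pvNsLoop]
    simp only [h (pre, uri) (by simp)]
    exact ih (fun q hq => h q (by simp [hq]))

-- string equality with an ofList, read on the char-list side
theorem pv_eq_ofList (s : String) (u : List Char) : s = String.ofList u ↔ s.toList = u := by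
  constructor
  · intro h; rw [h]; exact String.toList_ofList
  · intro h; rw [← h]; exact String.ofList_toList.symm

-- A's loop on a decomposed clark tag is a reverse-dict lookup
theorem pv_nsLoop_get (ns : List (String × String)) (u r : List Char)
    (hns : ∀ p ∈ ns, '}' ∉ p.2.toList) (hu : '}' ∉ u) :
    pvNsLoop ns ('{' :: (u ++ '}' :: r)) =
      match (PySem.Dict.mk (ns.map (fun p => (p.2, p.1)))).get? (String.ofList u) with
      | some pre => pre.toList ++ ':' :: r
      | none => '{' :: (u ++ '}' :: r) := by
  induction ns with
  | nil => simp [pvNsLoop, PySem.Dict.get?]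
  | cons p rest ih =>
    obtain ⟨pre, uri⟩ := p
    have huri : '}' ∉ uri.toList := hns (pre, uri) (by simp)
    have hpref : PySem.Chars.startswith ('{' :: (u ++ '}' :: r)) ('{' :: uri.toList ++ ['}']) = true ↔ uri.toList = u := by
      rw [PySem.Chars.startswith_iff]
      simp only [List.cons_append, List.cons_prefix_cons, true_and]
      exact pv_brace_prefix uri.toList u r huri hu
    by_cases hcase : uri.toList = u
    · rw [pvNsLoop, if_pos (hpref.mpr hcase)]
      have hkey : (uri == String.ofList u) = true := by
        rw [beq_iff_eq, pv_eq_ofList]; exact hcase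
      simp only [PySem.Dict.get?, List.map_cons, List.find?_cons, hkey, Option.map_some]
      have hlen : (('{' :: uri.toList ++ ['}']).length : Nat) = u.length + 2 := by simp [hcase]
      rw [hlen]
      have hslice : PySem.Chars.slice ('{' :: (u ++ '}' :: r)) (some ((u.length + 2 : Nat) : Int)) none = r := by
        rw [PySem.Chars.slice_eq_listSlice, PySem.List.slice_from_natCast]
        have h2 : ('{' :: (u ++ ['}'])).length = u.length + 2 := by simp
        calc List.drop (u.length + 2) ('{' :: (u ++ '}' :: r))
            = List.drop (('{' :: (u ++ ['}'])).length) (('{' :: (u ++ ['}'])) ++ r) := by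
              rw [h2]; congr 1; simp
          _ = r := List.drop_left
      rw [hslice]
    · have hsw : PySem.Chars.startswith ('{' :: (u ++ '}' :: r)) ('{' :: uri.toList ++ ['}']) = false := by
        rcases Bool.eq_false_or_eq_true (PySem.Chars.startswith ('{' :: (u ++ '}' :: r)) ('{' :: uri.toList ++ ['}'])) with h | h
        · exact absurd (hpref.mp h) hcase
        · exact h
      rw [pvNsLoop, if_neg (by simp only [List.cons_append] at hsw; simp [hsw])]
      have hkey : (uri == String.ofList u) = false := by
        rw [beq_eq_false_iff_ne]
        intro h
        exact hcase ((pv_eq_ofList uri u).mp h)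
      rw [ih (fun q hq => hns q (by simp [hq]))]
      simp only [PySem.Dict.get?, List.map_cons, List.find?_cons, hkey]

-- pvREV is the swapped NS list (all uris distinct, so each insert just appends)
theorem pv_REV_eq : pvREV = PySem.Dict.mk (pvNS.map (fun p => (p.2, p.1))) := by decide

-- takeWhile/dropWhile split of u ++ '}' :: r when '}' ∉ u
theorem pv_takeWhile_brace (u r : List Char) (hu : '}' ∉ u) :
    (u ++ '}' :: r).takeWhile (fun c => c != '}') = u ∧
    (u ++ '}' :: r).dropWhile (fun c => c != '}') = '}' :: r := by
  induction u with
  | nil => simp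
  | cons a u ih =>
    have ha : (a != '}') = true := by
      simp only [bne_iff_ne, ne_eq]
      intro h; exact hu (by simp [h])
    have hu' : '}' ∉ u := fun h => hu (by simp [h])
    rcases ih hu' with ⟨h1, h2⟩
    simp [ha, h1, h2]

-- the per-element core: A's NS scan = B's partition-and-lookup
theorem pv_local_eq (cs : List Char) : pvNsLoop pvNS cs = pvLocal cs := by
  have hns : ∀ p ∈ pvNS, '}' ∉ p.2.toList := by decide
  by_cases hbrace : PySem.Chars.startswith cs ['{'] = true
  · rcases (pv_singleton_prefix '{' cs).mp ((PySem.Chars.startswith_iff cs ['{']).mp hbrace) with ⟨t, ht⟩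
    subst ht
    by_cases hmem : '}' ∈ t
    · rcases pv_first_split hmem with ⟨u, r, htu, hu⟩
      subst htu
      rw [pv_nsLoop_get pvNS u r hns hu]
      have hu' : '}' ∉ '{' :: u := by
        intro h
        rcases List.mem_cons.1 h with h1 | h1
        · cases h1
        · exact hu h1
      have hsplit := pv_takeWhile_brace ('{' :: u) r hu'
      unfold pvLocal
      rw [if_pos hbrace]
      simp only [List.cons_append] at hsplit
      rw [hsplit.2, hsplit.1]
      have hslice : PySem.Chars.slice ('{' :: u) (some 1) none = u := by
        rw [PySem.Chars.slice_eq_listSlice]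
        have h1 : (1 : Int) = ((1 : Nat) : Int) := by norm_num
        rw [h1, PySem.List.slice_from_natCast]
        simp
      rw [hslice, pv_REV_eq]
    · -- no '}' anywhere: A matches nothing, B's dropWhile exhausts the string
      have hdrop : ('{' :: t).dropWhile (fun c => c != '}') = [] := by
        rw [List.dropWhile_eq_nil_iff]
        intro c hc
        simp only [bne_iff_ne, ne_eq]
        intro h
        rcases List.mem_cons.1 hc with h1 | h1
        · rw [h] at h1; cases h1
        · exact hmem (h ▸ h1)
      rw [pv_nsLoop_id pvNS ('{' :: t) ?hnm]
      · unfold pvLocal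
        rw [if_pos hbrace]
        simp only [hdrop]
      case hnm =>
        intro p _
        rcases Bool.eq_false_or_eq_true (PySem.Chars.startswith ('{' :: t) ('{' :: p.2.toList ++ ['}'])) with h | h
        · exfalso
          have hpre := (PySem.Chars.startswith_iff _ _).mp h
          have hm : '}' ∈ '{' :: t := hpre.subset (by simp)
          rcases List.mem_cons.1 hm with h' | h'
          · cases h'
          · exact hmem h'
        · exact h
  · -- clark does not start with '{'
    rw [pv_nsLoop_id pvNS cs ?nm]
    · unfold pvLocal
      rw [if_neg hbrace]
    case nm =>
      intro p _
      rcases Bool.eq_false_or_eq_true (PySem.Chars.startswith cs ('{' :: p.2.toList ++ ['}'])) with h | h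
      · exfalso
        apply hbrace
        rw [PySem.Chars.startswith_iff]
        have hpre := (PySem.Chars.startswith_iff _ _).mp h
        exact List.IsPrefix.trans ⟨p.2.toList ++ ['}'], by simp⟩ hpre
      · exact h

-- B's recursion equals '/' ++ the '/'-join of the mapped steps, on a nonempty list
theorem pv_go_eq_join (p : String × Int) (l : List (String × Int)) :
    pvGo (p :: l) =
      '/' :: PySem.Chars.join ['/']
        ((p :: l).map (fun q => pvLocal q.1.toList ++ '[' :: PySem.Int.toChars q.2 ++ [']'])) := by
  induction l generalizing p with
  | nil =>
    obtain ⟨c, i⟩ := p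
    simp [pvGo, PySem.Chars.join_singleton]
  | cons q l ih =>
    obtain ⟨c, i⟩ := p
    rw [pvGo, ih q]
    simp [PySem.Chars.join_cons_cons]

-- ===== VERDICT (by name: the statement is the Claim_ definition above) =====
theorem element_xpath_py_spec : Claim_equal_element_xpath_py := by
  intro pp _
  unfold Spec_element_xpath_py element_xpath_py element_xpath_py_alt
  rw [PySem.List.foldl_append_singleton_eq_map (fun p : String × Int => pvNsLoop pvNS p.1.toList ++ '[' :: PySem.Int.toChars p.2 ++ [']']) pp []]
  cases pp with
  | nil => simp [PySem.Chars.join_nil, pvGo]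
  | cons p l =>
    rw [pv_go_eq_join]
    simp only [List.nil_append, pv_local_eq]
    rw [if_neg (by simp)]
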